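-- pv_equiv track=rewrite | github.com/zhaolijian/suanfa | swordToOffer/t3.py | solu
-- ===== SOURCE A (Python) =====
-- def solu(m, n):
--     if m == 1:
--         return 1
--     # 找到第一个冲突的房间key，前面的无冲突数乘以pow(m, n-key-1)
--     res = 0
--     for i in range(n-1):
--         if i == 0:
--             res += m * pow(m, n - i - 2)
--         else:
--             res += m * pow(m - 1, i) * pow(m, n - i - 2)
--     return res % 100003
-- ===== SOURCE B (Python) =====
-- MOD = 100003
--
-- def solu(m, n):
--     # Closed form: sum_{i=0}^{n-2} m*(m-1)^i*m^(n-2-i) = m^n - m*(m-1)^(n-1),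
--     # computed with modular fast exponentiation.
--     if m == 1:
--         return 1
--     if n <= 0:
--         return 0
--     return (pow(m, n, MOD) - m % MOD * pow(m - 1, n - 1, MOD)) % MOD
-- ===== Notes on version B (the rewrite author's own statement) =====
-- stated objective: faster
-- what changed: Replaced A's O(n) loop of big-integer pow calls by the closed-form geometric sum m^n - m*(m-1)^(n-1) evaluated with three-argument modular pow.
import Mathlib
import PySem

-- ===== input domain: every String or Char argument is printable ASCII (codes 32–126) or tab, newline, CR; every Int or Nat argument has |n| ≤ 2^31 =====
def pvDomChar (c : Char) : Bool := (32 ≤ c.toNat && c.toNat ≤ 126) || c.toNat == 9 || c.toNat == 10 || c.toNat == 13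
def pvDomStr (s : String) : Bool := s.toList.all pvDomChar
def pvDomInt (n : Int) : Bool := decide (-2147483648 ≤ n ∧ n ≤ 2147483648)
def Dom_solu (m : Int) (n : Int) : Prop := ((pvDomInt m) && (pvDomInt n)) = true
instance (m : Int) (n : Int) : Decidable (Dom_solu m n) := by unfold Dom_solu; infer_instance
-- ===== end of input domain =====

-- B replaces A's O(n) loop of bigint powers by the closed form
-- m^n - m*(m-1)^(n-1) evaluated with three-argument modular pow (objective: faster).

-- ===== PORT A =====
-- pow(m, e) with e = n-i-2 ≥ 0 and pow(m-1, i) with i ≥ 0 inside the loop: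
-- ported as _ ^ (·).toNat, exact since both exponents are nonnegative for every i in range(n-1).
def solu (m : Int) (n : Int) : Int :=
  if m = 1 then 1
  else
    PySem.Int.mod
      ((PySem.List.pyRange 0 (n - 1) 1).foldl
        (fun res i =>
          if i = 0 then res + m * m ^ (n - i - 2).toNat
          else res + m * (m - 1) ^ i.toNat * m ^ (n - i - 2).toNat) 0)
      100003

-- ===== PORT B =====
-- pow(b, e, 100003) is PySem.Int.powMod b e.toNat 100003, exact since e ≥ 0 on this branch.
def solu_alt (m : Int) (n : Int) : Int :=
  if m = 1 then 1
  else if n ≤ 0 then 0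
  else
    PySem.Int.mod
      (PySem.Int.powMod m n.toNat 100003 -
        PySem.Int.mod m 100003 * PySem.Int.powMod (m - 1) (n - 1).toNat 100003)
      100003

-- ===== PRECONDITION & SPEC =====
def Spec_solu (m : Int) (n : Int) (out : Int) : Prop := out = solu_alt m n
instance (m : Int) (n : Int) (out : Int) : Decidable (Spec_solu m n out) := by unfold Spec_solu; infer_instance

-- ===== CLAIM (what is proved, stated in full; the proofs are below) =====
def Claim_equal_solu : Prop := ∀ (m : Int) (n : Int), Dom_solu m n → Spec_solu m n (solu m n)

-- ===== LEMMAS AND PROOFS =====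

lemma pv_foldl_eq_sum {α : Type} (f : α → Int) (L : List α) (a : Int) :
    L.foldl (fun r i => r + f i) a = a + (L.map f).sum := by
  induction L generalizing a with
  | nil => simp
  | cons x xs ih => simp [List.foldl_cons, ih, add_assoc]

lemma pv_geom (m : Int) (N : Nat) :
    ((List.range N).map (fun j => (m - 1) ^ j * m ^ (N - 1 - j))).sum
      = m ^ N - (m - 1) ^ N := by
  induction N with
  | zero => simp
  | succ N ih =>
    rw [List.range_succ, List.map_append, List.sum_append]
    have hcongr : (List.range N).map (fun j => (m - 1) ^ j * m ^ (N + 1 - 1 - j))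
        = (List.range N).map (fun j => ((m - 1) ^ j * m ^ (N - 1 - j)) * m) := by
      apply List.map_congr_left
      intro j hj
      have hjN : j < N := List.mem_range.mp hj
      have : N + 1 - 1 - j = (N - 1 - j) + 1 := by omega
      rw [this, pow_succ]; ring
    rw [hcongr, List.sum_map_mul_right, ih]
    simp [pow_succ]
    ring

lemma pv_loop_closed (m : Int) (N : Nat) (hN : 1 ≤ N) :
    ((PySem.List.pyRange 0 ((N : Int) + 1 - 1) 1).foldl
        (fun res i =>
          if i = 0 then res + m * m ^ (((N : Int) + 1) - i - 2).toNat
          else res + m * (m - 1) ^ i.toNat * m ^ (((N : Int) + 1) - i - 2).toNat) 0)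
      = m ^ (N + 1) - m * (m - 1) ^ N := by
  have hr : PySem.List.pyRange 0 ((N : Int) + 1 - 1) 1
      = (List.range N).map (fun k : Nat => (k : Int)) := by
    rw [PySem.List.pyRange_one]
    have h : ((N : Int) + 1 - 1 - 0).toNat = N := by omega
    rw [h]
    apply List.map_congr_left
    intro k _
    omega
  rw [hr, List.foldl_map]
  have hext : List.foldl
      (fun res (j : Nat) =>
        if (j : Int) = 0 then res + m * m ^ (((N : Int) + 1) - (j : Int) - 2).toNat
        else res + m * (m - 1) ^ ((j : Int)).toNat * m ^ (((N : Int) + 1) - (j : Int) - 2).toNat)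
      0 (List.range N)
      = List.foldl (fun r (j : Nat) => r + m * ((m - 1) ^ j * m ^ (N - 1 - j))) 0 (List.range N) := by
    apply List.foldl_ext
    intro r j hj
    have hjN : j < N := List.mem_range.mp hj
    have he : (((N : Int) + 1) - (j : Int) - 2).toNat = N - 1 - j := by omega
    have hi : ((j : Int)).toNat = j := Int.toNat_natCast j
    simp only [Nat.cast_eq_zero, he, hi]
    by_cases h0 : j = 0
    · subst h0; simp
    · rw [if_neg h0]; ring
  rw [hext, pv_foldl_eq_sum, zero_add]
  have hfac : (List.range N).map (fun j => m * ((m - 1) ^ j * m ^ (N - 1 - j)))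
      = (List.range N).map (fun j => (m - 1) ^ j * m ^ (N - 1 - j) * m) := by
    apply List.map_congr_left; intro j _; ring
  rw [hfac, List.sum_map_mul_right, pv_geom]
  rw [pow_succ]; ring

lemma pv_mod_shape (X Y m : Int) :
    (X - m * Y) % 100003 = (X % 100003 - m % 100003 * (Y % 100003)) % 100003 := by
  conv_lhs => rw [Int.sub_emod, Int.mul_emod]
  conv_rhs => rw [Int.sub_emod, Int.mul_emod, Int.emod_emod_of_dvd _ dvd_rfl,
    Int.emod_emod_of_dvd _ dvd_rfl, Int.emod_emod_of_dvd _ dvd_rfl]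

-- ===== VERDICT (by name: the statement is the Claim_ definition above) =====
theorem solu_spec : Claim_equal_solu := by
  intro m n _
  unfold Spec_solu solu solu_alt
  by_cases hm : m = 1
  · simp [hm]
  · simp only [hm, if_false]
    by_cases hn2 : n ≤ 1
    · -- empty loop; A returns 0; B returns 0 on both branches n ≤ 0 and n = 1
      rw [PySem.List.pyRange_one_eq_nil (by omega)]
      simp only [List.foldl_nil]
      by_cases hn0 : n ≤ 0
      · simp [hn0, PySem.Int.mod]
      · have hn1 : n = 1 := by omega
        subst hn1
        simp [PySem.Int.powMod]
    · -- n ≥ 2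
      have hn0 : ¬ n ≤ 0 := by omega
      simp only [hn0, if_false]
      obtain ⟨N, hN, hN1⟩ : ∃ N : Nat, n = (N : Int) + 1 ∧ 1 ≤ N :=
        ⟨(n - 1).toNat, by omega, by omega⟩
      subst hN
      rw [pv_loop_closed m N hN1]
      have h1 : ((N : Int) + 1).toNat = N + 1 := by omega
      have h2 : ((N : Int) + 1 - 1).toNat = N := by omega
      rw [h1, h2]
      simp only [PySem.Int.powMod,
        PySem.Int.mod_eq_emod_of_pos (by norm_num : (0:Int) < 100003)]
      exact pv_mod_shape (m ^ (N + 1)) ((m - 1) ^ N) m
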